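-- pv_equiv track=rewrite | github.com/mitch-jensen/drum_book_tracker | src/book_tracker/ocr.py | _extract_audiveris_detail
-- ===== SOURCE A (Python) =====
-- def _extract_audiveris_detail(output: str) -> str:
--     """Extract the most actionable message from Audiveris output."""
--     lines = output.splitlines()
--
--     def normalize(line: str) -> str:
--         return line.split("|", 1)[-1].strip() if "|" in line else line.strip()
--
--     def is_noise(line: str) -> bool:
--         lower = line.lower()
--         if not line:
--             return True
--         if "at org." in line or "at java." in line:
--             return True
--         if "book{" in lower and "storing" in lower:
--             return True
--         if "book stored as" in lower and ".omr" in lower: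
--             return True
--         if lower.startswith("stored ") or lower.startswith("storing "):
--             return True
--         if " stored /" in lower or " storing /" in lower:
--             return True
--         return False
--
--     normalized = [normalize(line) for line in lines]
--
--     # Priority 1: resolution/DPI warnings (most actionable)
--     for line in normalized:
--         if "too low" in line or "DPI" in line or "interline" in line:
--             return line
--
--     # Priority 2: generic stub failure + nearby cause line
--     for index, line in enumerate(normalized):
--         if "Error processing stub" in line:
--             for candidate in normalized[index + 1 :]:
--                 if is_noise(candidate):
--                     continue
--                 if "Exception" in candidate and "Caused by" not in candidate:
--                     continue
--                 if "Error processing stub" in candidate: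
--                     continue
--                 return f"{line}. {candidate}"
--             return line
--
--     # Priority 2: WARN lines (excluding Java stack traces)
--     for line in normalized:
--         if "WARN" in line and not is_noise(line) and "Exception" not in line:
--             return line
--
--     # Priority 3: any non-empty line that is not a Java stack trace
--     for line in normalized:
--         if not is_noise(line):
--             return line
--
--     return ""
-- ===== SOURCE B (Python) =====
-- def _extract_audiveris_detail(output: str) -> str:
--     """Extract the most actionable message from Audiveris output (single forward pass)."""
--
--     def normalize(line: str) -> str:
--         return line.split("|", 1)[-1].strip() if "|" in line else line.strip()
--
--     def is_noise(line: str) -> bool: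
--         lower = line.lower()
--         if not line:
--             return True
--         if "at org." in line or "at java." in line:
--             return True
--         if "book{" in lower and "storing" in lower:
--             return True
--         if "book stored as" in lower and ".omr" in lower:
--             return True
--         if lower.startswith("stored ") or lower.startswith("storing "):
--             return True
--         if " stored /" in lower or " storing /" in lower:
--             return True
--         return False
--
--     p1 = stub = cause = warn = fallback = None
--     for raw in output.splitlines():
--         line = normalize(raw)
--         if p1 is None and ("too low" in line or "DPI" in line or "interline" in line):
--             p1 = line
--         if stub is not None and cause is None:
--             if (not is_noise(line)
--                     and not ("Exception" in line and "Caused by" not in line)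
--                     and "Error processing stub" not in line):
--                 cause = line
--         if stub is None and "Error processing stub" in line:
--             stub = line
--         if warn is None and "WARN" in line and not is_noise(line) and "Exception" not in line:
--             warn = line
--         if fallback is None and not is_noise(line):
--             fallback = line
--     if p1 is not None:
--         return p1
--     if stub is not None:
--         return f"{stub}. {cause}" if cause is not None else stub
--     if warn is not None:
--         return warn
--     if fallback is not None:
--         return fallback
--     return ""
-- ===== Notes on version B (the rewrite author's own statement) =====
-- stated objective: alternative
-- what changed: Replaced A's four separate priority scans over the normalized lines (with a nested inner scan for the stub's cause line) by a single forward pass that maintains first-match slots for each priority (resolution, stub, cause-after-stub, WARN, fallback) and combines them by priority afterwards.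
import Mathlib
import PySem

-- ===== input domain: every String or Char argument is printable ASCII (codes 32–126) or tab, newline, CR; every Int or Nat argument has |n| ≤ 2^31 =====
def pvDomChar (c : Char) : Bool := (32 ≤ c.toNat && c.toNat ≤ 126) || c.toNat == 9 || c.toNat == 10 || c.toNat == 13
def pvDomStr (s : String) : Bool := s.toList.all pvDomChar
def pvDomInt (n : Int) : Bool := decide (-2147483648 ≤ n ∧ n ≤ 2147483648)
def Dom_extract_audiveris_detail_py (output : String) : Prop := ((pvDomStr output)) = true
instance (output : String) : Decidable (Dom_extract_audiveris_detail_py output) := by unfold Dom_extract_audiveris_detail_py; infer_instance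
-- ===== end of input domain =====

-- B replaces A's four separate scans over the normalized lines by ONE forward pass
-- maintaining first-match slots for each priority (objective: alternative decomposition).

-- ===== PORT A =====
-- helpers shared by both Pythons (normalize / is_noise are identical in Source A and Source B)
def pyNormalize (line : String) : String :=
  if PySem.Str.isIn "|" line then
    -- line.split("|", 1)[-1].strip(); split never returns [] and "|" ≠ "", so the defaults are dead
    PySem.Str.strip ((PySem.List.pyGet? ((PySem.Str.splitMax? line "|" 1).getD []) (-1)).getD "")
  else PySem.Str.strip line

def pyIsNoise (line : String) : Bool :=
  let lower := PySem.Str.lower line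
  if line == "" then true
  else if PySem.Str.isIn "at org." line || PySem.Str.isIn "at java." line then true
  else if PySem.Str.isIn "book{" lower && PySem.Str.isIn "storing" lower then true
  else if PySem.Str.isIn "book stored as" lower && PySem.Str.isIn ".omr" lower then true
  else if PySem.Str.startswith lower "stored " || PySem.Str.startswith lower "storing " then true
  else if PySem.Str.isIn " stored /" lower || PySem.Str.isIn " storing /" lower then true
  else false

-- A's four sequential return-from-loop scans, as find-style recursions
def aP1 : List String → Option String
  | [] => none
  | l :: rest =>
    if PySem.Str.isIn "too low" l || PySem.Str.isIn "DPI" l || PySem.Str.isIn "interline" l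
    then some l else aP1 rest

def aCause : List String → Option String
  | [] => none
  | c :: rest =>
    if pyIsNoise c then aCause rest
    else if PySem.Str.isIn "Exception" c && !PySem.Str.isIn "Caused by" c then aCause rest
    else if PySem.Str.isIn "Error processing stub" c then aCause rest
    else some c

def aStub : List String → Option String
  | [] => none
  | l :: rest =>
    if PySem.Str.isIn "Error processing stub" l then
      some (match aCause rest with
            | some c => l ++ ". " ++ c
            | none => l)
    else aStub rest

def aWarn : List String → Option String
  | [] => none
  | l :: rest =>
    if PySem.Str.isIn "WARN" l && !pyIsNoise l && !PySem.Str.isIn "Exception" l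
    then some l else aWarn rest

def aFallback : List String → Option String
  | [] => none
  | l :: rest => if !pyIsNoise l then some l else aFallback rest

def extract_audiveris_detail_py (output : String) : String :=
  let normalized := (PySem.Str.splitlines output).map pyNormalize
  match aP1 normalized with
  | some l => l
  | none =>
    match aStub normalized with
    | some l => l
    | none =>
      match aWarn normalized with
      | some l => l
      | none =>
        match aFallback normalized with
        | some l => l
        | none => ""

-- ===== PORT B =====
def bP1 (l : String) : Bool :=
  PySem.Str.isIn "too low" l || PySem.Str.isIn "DPI" l || PySem.Str.isIn "interline" l

def bStubP (l : String) : Bool := PySem.Str.isIn "Error processing stub" l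

def bCauseOK (l : String) : Bool :=
  !pyIsNoise l && !(PySem.Str.isIn "Exception" l && !PySem.Str.isIn "Caused by" l) && !bStubP l

def bWarnOK (l : String) : Bool :=
  PySem.Str.isIn "WARN" l && !pyIsNoise l && !PySem.Str.isIn "Exception" l

-- 'slot if slot is not None else (line if p)'
def bFirst (o : Option String) (p : Bool) (l : String) : Option String :=
  match o with
  | some v => some v
  | none => if p then some l else none

abbrev BState := Option String × Option String × Option String × Option String × Option String

def bStep (s : BState) (raw : String) : BState :=
  let l := pyNormalize raw
  let (p1, stub, cause, warn, fb) := s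
  (bFirst p1 (bP1 l) l,
   bFirst stub (bStubP l) l,
   (if stub.isSome then bFirst cause (bCauseOK l) l else cause),
   bFirst warn (bWarnOK l) l,
   bFirst fb (!pyIsNoise l) l)

def extract_audiveris_detail_py_alt (output : String) : String :=
  match (PySem.Str.splitlines output).foldl bStep (none, none, none, none, none) with
  | (some l, _, _, _, _) => l
  | (none, some s, cause, _, _) =>
    (match cause with
     | some c => s ++ ". " ++ c
     | none => s)
  | (none, none, _, some w, _) => w
  | (none, none, _, none, some f) => f
  | (none, none, _, none, none) => ""

-- ===== PRECONDITION & SPEC =====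
def Spec_extract_audiveris_detail_py (output : String) (out : String) : Prop := out = extract_audiveris_detail_py_alt output
instance (output : String) (out : String) : Decidable (Spec_extract_audiveris_detail_py output out) := by unfold Spec_extract_audiveris_detail_py; infer_instance

-- ===== CLAIM (what is proved, stated in full; the proofs are below) =====
def Claim_equal_extract_audiveris_detail_py : Prop := ∀ (output : String), Dom_extract_audiveris_detail_py output → Spec_extract_audiveris_detail_py output (extract_audiveris_detail_py output)

-- ===== LEMMAS AND PROOFS =====

-- first-stub line together with its cause search over the remainder (proof-side view of aStub)
def sc : List String → Option String × Option String
  | [] => (none, none)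
  | l :: rest => if bStubP l then (some l, aCause rest) else sc rest

def orO (a b : Option String) : Option String :=
  match a with
  | some v => some v
  | none => b

theorem orO_none (x : Option String) : orO none x = x := rfl

theorem orO_first (a : Option String) (p : Bool) (l : String) (x : Option String) :
    orO (bFirst a p l) x = orO a (if p then some l else x) := by
  cases a <;> cases p <;> simp [bFirst, orO]

theorem aP1_cons (l : String) (r : List String) :
    aP1 (l :: r) = if bP1 l then some l else aP1 r := rfl

theorem aWarn_cons (l : String) (r : List String) :
    aWarn (l :: r) = if bWarnOK l then some l else aWarn r := rfl

theorem aFallback_cons (l : String) (r : List String) :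
    aFallback (l :: r) = if !pyIsNoise l then some l else aFallback r := rfl

theorem aCause_cons (l : String) (rest : List String) :
    aCause (l :: rest) = if bCauseOK l then some l else aCause rest := by
  conv_lhs => rw [aCause]
  unfold bCauseOK bStubP
  split_ifs <;> simp_all

theorem sc_cons_1 (l : String) (r : List String) :
    (sc (l :: r)).1 = if bStubP l then some l else (sc r).1 := by
  cases h : bStubP l <;> simp [sc, h]

theorem sc_cons_2 (l : String) (r : List String) :
    (sc (l :: r)).2 = if bStubP l then aCause r else (sc r).2 := by
  cases h : bStubP l <;> simp [sc, h]

theorem aStub_eq_sc (ls : List String) :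
    aStub ls = (match sc ls with
                | (some s, some c) => some (s ++ ". " ++ c)
                | (some s, none) => some s
                | (none, _) => none) := by
  induction ls with
  | nil => rfl
  | cons l rest ih =>
    simp only [aStub, sc, bStubP]
    by_cases h : PySem.Str.isIn "Error processing stub" l = true
    · simp only [h, if_true]
      cases aCause rest <;> rfl
    · simp only [h, if_false, Bool.false_eq_true, ih]

theorem foldl_bStep (ls : List String) (p1 stub cause warn fb : Option String) :
    ls.foldl bStep (p1, stub, cause, warn, fb) =
      (orO p1 (aP1 (ls.map pyNormalize)),
       orO stub ((sc (ls.map pyNormalize)).1),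
       (match stub with
        | some _ => orO cause (aCause (ls.map pyNormalize))
        | none => orO cause ((sc (ls.map pyNormalize)).2)),
       orO warn (aWarn (ls.map pyNormalize)),
       orO fb (aFallback (ls.map pyNormalize))) := by
  induction ls generalizing p1 stub cause warn fb with
  | nil =>
    simp only [List.foldl_nil, List.map_nil]
    cases p1 <;> cases stub <;> cases cause <;> cases warn <;> cases fb <;> rfl
  | cons raw rest ih =>
    simp only [List.foldl_cons, List.map_cons, bStep]
    rw [ih]
    simp only [Prod.mk.injEq]
    refine ⟨?_, ?_, ?_, ?_, ?_⟩
    · rw [orO_first, aP1_cons]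
    · rw [orO_first, sc_cons_1]
    · cases stub with
      | some v =>
        show orO (bFirst cause (bCauseOK (pyNormalize raw)) (pyNormalize raw))
              (aCause (rest.map pyNormalize)) = _
        rw [orO_first, ← aCause_cons]
      | none =>
        cases h : bStubP (pyNormalize raw) with
        | true =>
          show orO cause (aCause (rest.map pyNormalize)) = _
          · simp only [if_true, sc_cons_2, h]
        | false =>
          show orO cause ((sc (rest.map pyNormalize)).2) = _
          · simp only [h, if_false, sc_cons_2, Bool.false_eq_true]
    · rw [orO_first, aWarn_cons]
    · rw [orO_first, aFallback_cons]

-- ===== VERDICT (by name: the statement is the Claim_ definition above) =====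
theorem extract_audiveris_detail_py_spec : Claim_equal_extract_audiveris_detail_py := by
  intro output _
  unfold Spec_extract_audiveris_detail_py extract_audiveris_detail_py extract_audiveris_detail_py_alt
  dsimp only
  rw [foldl_bStep, aStub_eq_sc]
  simp only [orO_none]
  cases h1 : aP1 ((PySem.Str.splitlines output).map pyNormalize) with
  | some v => rfl
  | none =>
    rcases hsc : sc ((PySem.Str.splitlines output).map pyNormalize) with ⟨_ | s, _ | c⟩ <;>
      first
      | rfl
      | (cases hw : aWarn ((PySem.Str.splitlines output).map pyNormalize) <;>
          first
          | rfl
          | (cases hf : aFallback ((PySem.Str.splitlines output).map pyNormalize) <;> rfl))
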